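-- pv_equiv track=rewrite | github.com/ziwenhahaha/daily-paper-reader | src/6.generate_docs.py | normalize_sidebar_tag
-- ===== SOURCE A (Python) =====
-- def normalize_sidebar_tag(tag: str) -> str:
--     text = (tag or "").strip()
--     if not text:
--         return ""
--     for prefix in ("keyword:", "query:", "paper:", "ref:", "cite:"):
--         if text.startswith(prefix):
--             return text[len(prefix) :].strip()
--     return text
-- ===== SOURCE B (Python) =====
-- def normalize_sidebar_tag(tag: str) -> str:
--     text = (tag or "").strip()
--     i = text.find(":")
--     if i != -1 and text[:i] in ("keyword", "query", "paper", "ref", "cite"):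
--         return text[i + 1:].strip()
--     return text
-- ===== Notes on version B (the rewrite author's own statement) =====
-- stated objective: simpler
-- what changed: Replaces the loop of five startswith checks by locating the first colon once and testing the prefix name before it against a fixed tuple; the empty-text guard disappears because find returns -1 on the empty string.
import Mathlib
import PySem

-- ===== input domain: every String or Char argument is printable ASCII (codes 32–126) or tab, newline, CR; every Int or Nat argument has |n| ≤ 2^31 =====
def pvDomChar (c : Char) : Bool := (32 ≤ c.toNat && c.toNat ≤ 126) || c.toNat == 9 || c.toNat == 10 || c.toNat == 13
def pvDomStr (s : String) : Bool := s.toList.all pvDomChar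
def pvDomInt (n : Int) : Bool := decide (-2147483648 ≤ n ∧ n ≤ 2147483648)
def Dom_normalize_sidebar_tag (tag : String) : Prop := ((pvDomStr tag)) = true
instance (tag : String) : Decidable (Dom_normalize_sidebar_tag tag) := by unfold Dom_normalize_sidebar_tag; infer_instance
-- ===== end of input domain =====

-- B replaces A's loop of five startswith checks by locating the first colon once and testing the
-- name before it for membership in a fixed tuple (objective: simpler; return values are identical).

-- ===== PORT A =====
-- the for-loop over the prefix tuple: returns at the first matching prefix, else falls through
def pvALoop (text : String) : List String → String
  | [] => text
  | p :: ps =>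
    if PySem.Str.startswith text p then
      PySem.Str.strip (PySem.Str.slice text (some (PySem.Str.len p : Int)) none)
    else pvALoop text ps

def normalize_sidebar_tag (tag : String) : String :=
  let text := PySem.Str.strip (if tag = "" then "" else tag)  -- (tag or "").strip()
  if text = "" then ""                                        -- if not text: return ""
  else pvALoop text ["keyword:", "query:", "paper:", "ref:", "cite:"]

-- ===== PORT B =====
def normalize_sidebar_tag_alt (tag : String) : String :=
  let text := PySem.Str.strip (if tag = "" then "" else tag)  -- (tag or "").strip()
  let i := PySem.Str.find text ":"                            -- text.find(":")
  if i ≠ -1 ∧ PySem.Str.slice text none (some i) ∈ (["keyword", "query", "paper", "ref", "cite"] : List String) then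
    PySem.Str.strip (PySem.Str.slice text (some (i + 1)) none)
  else text

-- ===== PRECONDITION & SPEC =====
def Spec_normalize_sidebar_tag (tag : String) (out : String) : Prop := out = normalize_sidebar_tag_alt tag
instance (tag : String) (out : String) : Decidable (Spec_normalize_sidebar_tag tag out) := by unfold Spec_normalize_sidebar_tag; infer_instance

-- ===== CLAIM (what is proved, stated in full; the proofs are below) =====
def Claim_equal_normalize_sidebar_tag : Prop := ∀ (tag : String), Dom_normalize_sidebar_tag tag → Spec_normalize_sidebar_tag tag (normalize_sidebar_tag tag)

-- ===== LEMMAS AND PROOFS =====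

lemma pv_prefix_head {c : Char} {l : List Char} : [c] <+: l ↔ l[0]? = some c := by
  cases l with
  | nil => simp
  | cons a t => simp [List.cons_prefix_cons, eq_comm]

-- a prefix of the form name ++ ":" (with ':' not in name) matches iff the first colon of s
-- sits exactly at position name.length and the text before it is name
lemma pvSW (s name : List Char) (hname : ':' ∉ name) :
    PySem.Chars.startswith s (name ++ [':']) = true ↔
      PySem.Chars.find s [':'] = (name.length : Int) ∧ List.take name.length s = name := by
  rw [PySem.Chars.startswith_iff]
  constructor
  · intro h
    obtain ⟨r, hr⟩ := h
    subst hr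
    have hdrop : [':'] <+: List.drop name.length ((name ++ [':']) ++ r) := by
      rw [List.append_assoc, List.drop_left]
      exact ⟨r, rfl⟩
    have hpos : 0 ≤ PySem.Chars.find ((name ++ [':']) ++ r) [':'] :=
      (PySem.Chars.find_nonneg_iff _ _).mpr ⟨name, r, by simp⟩
    obtain ⟨hf1, hf2⟩ := PySem.Chars.find_spec hpos
    set m := (PySem.Chars.find ((name ++ [':']) ++ r) [':']).toNat with hm
    have hle : m ≤ name.length := Nat.le_of_not_lt fun hgt => hf2 name.length hgt hdrop
    have hge : name.length ≤ m := by
      refine Nat.le_of_not_lt fun hlt => ?_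
      have h0 := pv_prefix_head.mp hf1
      rw [List.getElem?_drop] at h0
      have hmn : name[m]? = some ':' := by
        rw [List.append_assoc, List.getElem?_append_left (by omega)] at h0
        simpa using h0
      exact hname (List.mem_of_getElem? hmn)
    have hme : m = name.length := le_antisymm hle hge
    refine ⟨?_, ?_⟩
    · have := Int.toNat_of_nonneg hpos
      rw [← this, ← hm, hme]
    · rw [List.append_assoc, List.take_left]
  · rintro ⟨hf, ht⟩
    have hpos : 0 ≤ PySem.Chars.find s [':'] := by rw [hf]; positivity
    obtain ⟨hf1, -⟩ := PySem.Chars.find_spec hpos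
    rw [hf] at hf1
    simp only [Int.toNat_natCast] at hf1
    obtain ⟨r, hr⟩ := hf1
    refine ⟨r, ?_⟩
    conv_rhs => rw [← List.take_append_drop name.length s, ht, ← hr]
    simp

-- when s has no colon at all, no name ++ ":" prefix can match
lemma pvSW_none (s name : List Char) (h : ¬ [':'] <:+: s) :
    PySem.Chars.startswith s (name ++ [':']) = false := by
  rw [Bool.eq_false_iff]
  intro hsw
  obtain ⟨r, hr⟩ := (PySem.Chars.startswith_iff _ _).mp hsw
  exact h ⟨name, r, by simpa using hr⟩

lemma pvSW_false (s : List Char) (n : Nat) (hn : PySem.Chars.find s [':'] = (n : Int))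
    (name : List Char) (hname : ':' ∉ name) (hne : List.take n s ≠ name) :
    PySem.Chars.startswith s (name ++ [':']) = false := by
  rw [Bool.eq_false_iff]
  intro hsw
  obtain ⟨hf, ht⟩ := (pvSW s name hname).mp hsw
  rw [hn] at hf
  have : n = name.length := by exact_mod_cast hf
  exact hne (this ▸ ht)

lemma pv_n_len (s : List Char) (n : Nat) (hn : PySem.Chars.find s [':'] = (n : Int))
    (name : List Char) (ht : List.take n s = name) : n = name.length := by
  have hle := PySem.Chars.find_le_length s [':']
  rw [hn] at hle
  have hns : n ≤ s.length := by exact_mod_cast hle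
  have := congrArg List.length ht
  simpa [Nat.min_eq_left hns] using this

lemma pvSW_true (s : List Char) (n : Nat) (hn : PySem.Chars.find s [':'] = (n : Int))
    (name : List Char) (hname : ':' ∉ name) (ht : List.take n s = name) :
    PySem.Chars.startswith s (name ++ [':']) = true := by
  have hlen := pv_n_len s n hn name ht
  exact (pvSW s name hname).mpr ⟨by rw [← hlen]; exact hn, by rw [← hlen]; exact ht⟩

-- Str-level wrappers around pvSW for the literal prefixes
lemma pvStrSW_none (t : String) (hc : ¬ [':'] <:+: t.toList) (p name : String)
    (he : p.toList = name.toList ++ [':']) : PySem.Str.startswith t p = false := by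
  rw [PySem.Str.startswith_eq, he]
  exact pvSW_none _ _ hc

lemma pvStrSW_false (t : String) (n : Nat) (hn : PySem.Chars.find t.toList [':'] = (n : Int))
    (p name : String) (he : p.toList = name.toList ++ [':']) (hname : ':' ∉ name.toList)
    (hne : t.toList.take n ≠ name.toList) : PySem.Str.startswith t p = false := by
  rw [PySem.Str.startswith_eq, he]
  exact pvSW_false _ n hn _ hname hne

lemma pvStrSW_true (t : String) (n : Nat) (hn : PySem.Chars.find t.toList [':'] = (n : Int))
    (p name : String) (he : p.toList = name.toList ++ [':']) (hname : ':' ∉ name.toList)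
    (ht : t.toList.take n = name.toList) : PySem.Str.startswith t p = true := by
  rw [PySem.Str.startswith_eq, he]
  exact pvSW_true _ n hn _ hname ht

-- the core equality, for an arbitrary (already stripped) text
lemma pv_core (t : String) :
    (if t = "" then "" else pvALoop t ["keyword:", "query:", "paper:", "ref:", "cite:"]) =
    (let i := PySem.Str.find t ":"
     if i ≠ -1 ∧ PySem.Str.slice t none (some i) ∈ (["keyword", "query", "paper", "ref", "cite"] : List String) then
       PySem.Str.strip (PySem.Str.slice t (some (i + 1)) none)
     else t) := by
  have hcolon : (":" : String).toList = [':'] := rfl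
  by_cases hc : [':'] <:+: t.toList
  · -- the text contains a colon
    have hpos : 0 ≤ PySem.Chars.find t.toList [':'] := (PySem.Chars.find_nonneg_iff _ _).mpr hc
    obtain ⟨n, hn⟩ : ∃ n : Nat, PySem.Chars.find t.toList [':'] = (n : Int) :=
      ⟨_, (Int.toNat_of_nonneg hpos).symm⟩
    have hfind : PySem.Str.find t ":" = (n : Int) := by rw [PySem.Str.find_eq, hcolon, hn]
    have hnil : t.toList ≠ [] := by intro h; rw [h] at hc; simp at hc
    have hne : t ≠ "" := fun h => hnil (by subst h; rfl)
    have hint : ((n : Int)) ≠ -1 := by omega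
    have hu : (PySem.Str.slice t none (some (n : Int))).toList = t.toList.take n := by
      rw [PySem.Str.toList_slice, PySem.Chars.slice_eq_listSlice, PySem.List.slice_to _ (by omega)]
      simp
    simp only [hfind]
    by_cases h1 : t.toList.take n = "keyword".toList
    · have hs1 := pvStrSW_true t n hn "keyword:" "keyword" (by decide) (by decide) h1
      have husl : PySem.Str.slice t none (some (n : Int)) = "keyword" := by
        rw [← String.toList_inj, hu, h1]
      have hn7 : n = 7 := by rw [pv_n_len t.toList n hn _ h1]; decide
      rw [if_neg hne, if_pos ⟨hint, by rw [husl]; decide⟩]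
      simp only [pvALoop, hs1, if_true]
      rw [show PySem.Str.len "keyword:" = (n : Int) + 1 from by rw [hn7]; decide]
    · by_cases h2 : t.toList.take n = "query".toList
      · have hs1 := pvStrSW_false t n hn "keyword:" "keyword" (by decide) (by decide) h1
        have hs2 := pvStrSW_true t n hn "query:" "query" (by decide) (by decide) h2
        have husl : PySem.Str.slice t none (some (n : Int)) = "query" := by
          rw [← String.toList_inj, hu, h2]
        have hn5 : n = 5 := by rw [pv_n_len t.toList n hn _ h2]; decide
        rw [if_neg hne, if_pos ⟨hint, by rw [husl]; decide⟩]
        simp only [pvALoop, hs1, hs2, Bool.false_eq_true, if_false, if_true]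
        rw [show PySem.Str.len "query:" = (n : Int) + 1 from by rw [hn5]; decide]
      · by_cases h3 : t.toList.take n = "paper".toList
        · have hs1 := pvStrSW_false t n hn "keyword:" "keyword" (by decide) (by decide) h1
          have hs2 := pvStrSW_false t n hn "query:" "query" (by decide) (by decide) h2
          have hs3 := pvStrSW_true t n hn "paper:" "paper" (by decide) (by decide) h3
          have husl : PySem.Str.slice t none (some (n : Int)) = "paper" := by
            rw [← String.toList_inj, hu, h3]
          have hn5 : n = 5 := by rw [pv_n_len t.toList n hn _ h3]; decide
          rw [if_neg hne, if_pos ⟨hint, by rw [husl]; decide⟩]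
          simp only [pvALoop, hs1, hs2, hs3, Bool.false_eq_true, if_false, if_true]
          rw [show PySem.Str.len "paper:" = (n : Int) + 1 from by rw [hn5]; decide]
        · by_cases h4 : t.toList.take n = "ref".toList
          · have hs1 := pvStrSW_false t n hn "keyword:" "keyword" (by decide) (by decide) h1
            have hs2 := pvStrSW_false t n hn "query:" "query" (by decide) (by decide) h2
            have hs3 := pvStrSW_false t n hn "paper:" "paper" (by decide) (by decide) h3
            have hs4 := pvStrSW_true t n hn "ref:" "ref" (by decide) (by decide) h4
            have husl : PySem.Str.slice t none (some (n : Int)) = "ref" := by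
              rw [← String.toList_inj, hu, h4]
            have hn3 : n = 3 := by rw [pv_n_len t.toList n hn _ h4]; decide
            rw [if_neg hne, if_pos ⟨hint, by rw [husl]; decide⟩]
            simp only [pvALoop, hs1, hs2, hs3, hs4, Bool.false_eq_true, if_false, if_true]
            rw [show PySem.Str.len "ref:" = (n : Int) + 1 from by rw [hn3]; decide]
          · by_cases h5 : t.toList.take n = "cite".toList
            · have hs1 := pvStrSW_false t n hn "keyword:" "keyword" (by decide) (by decide) h1
              have hs2 := pvStrSW_false t n hn "query:" "query" (by decide) (by decide) h2
              have hs3 := pvStrSW_false t n hn "paper:" "paper" (by decide) (by decide) h3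
              have hs4 := pvStrSW_false t n hn "ref:" "ref" (by decide) (by decide) h4
              have hs5 := pvStrSW_true t n hn "cite:" "cite" (by decide) (by decide) h5
              have husl : PySem.Str.slice t none (some (n : Int)) = "cite" := by
                rw [← String.toList_inj, hu, h5]
              have hn4 : n = 4 := by rw [pv_n_len t.toList n hn _ h5]; decide
              rw [if_neg hne, if_pos ⟨hint, by rw [husl]; decide⟩]
              simp only [pvALoop, hs1, hs2, hs3, hs4, hs5, Bool.false_eq_true, if_false, if_true]
              rw [show PySem.Str.len "cite:" = (n : Int) + 1 from by rw [hn4]; decide]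
            · have hs1 := pvStrSW_false t n hn "keyword:" "keyword" (by decide) (by decide) h1
              have hs2 := pvStrSW_false t n hn "query:" "query" (by decide) (by decide) h2
              have hs3 := pvStrSW_false t n hn "paper:" "paper" (by decide) (by decide) h3
              have hs4 := pvStrSW_false t n hn "ref:" "ref" (by decide) (by decide) h4
              have hs5 := pvStrSW_false t n hn "cite:" "cite" (by decide) (by decide) h5
              have hnm : ¬ ((n : Int) ≠ -1 ∧ PySem.Str.slice t none (some (n : Int)) ∈
                  (["keyword", "query", "paper", "ref", "cite"] : List String)) := by
                rintro ⟨-, hm⟩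
                simp only [List.mem_cons, List.not_mem_nil, or_false,
                  ← String.toList_inj, hu] at hm
                rcases hm with h | h | h | h | h
                exacts [h1 h, h2 h, h3 h, h4 h, h5 h]
              rw [if_neg hne, if_neg hnm]
              simp only [pvALoop, hs1, hs2, hs3, hs4, hs5, Bool.false_eq_true, if_false]
  · -- no colon in the text: A's loop falls through, B's condition is false
    have hf : PySem.Chars.find t.toList [':'] = -1 := (PySem.Chars.find_eq_neg_one_iff _ _).mpr hc
    have hfind : PySem.Str.find t ":" = -1 := by rw [PySem.Str.find_eq, hcolon, hf]
    have hs1 := pvStrSW_none t hc "keyword:" "keyword" (by decide)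
    have hs2 := pvStrSW_none t hc "query:" "query" (by decide)
    have hs3 := pvStrSW_none t hc "paper:" "paper" (by decide)
    have hs4 := pvStrSW_none t hc "ref:" "ref" (by decide)
    have hs5 := pvStrSW_none t hc "cite:" "cite" (by decide)
    simp only [hfind, ne_eq, not_true, false_and, if_false]
    simp only [pvALoop, hs1, hs2, hs3, hs4, hs5, Bool.false_eq_true, if_false]
    split_ifs with h
    · exact h.symm
    · rfl

-- ===== VERDICT (by name: the statement is the Claim_ definition above) =====
theorem normalize_sidebar_tag_spec : Claim_equal_normalize_sidebar_tag := by
  intro tag _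
  unfold Spec_normalize_sidebar_tag normalize_sidebar_tag normalize_sidebar_tag_alt
  rw [← pv_core]
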